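-- pv_equiv track=rewrite | github.com/bkille/RESP | Project/group2.py | column_probability
-- ===== SOURCE A (Python) =====
-- def student_consecutive_k(input_list, k, stone):
--     # Your code goes here
--     counter = 0
--     consecutive = False
--     for i in input_list:
--       if i == stone:
--         counter += 1
--       if i != stone:
--         counter = 0
--       if counter == k:
--         consecutive = True
--         break
--     return consecutive
--
-- def get_column(board):
--   columns = []
--   for column_idx in range(len(board)):
--     single_column = []
--     for row in board:
--       single_column.append(row[column_idx])
--     columns.append(single_column)
--   return columns
--
-- def column_probability(board, stone):
--   probability = 0
--   columns = get_column(board)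
--   for column in columns:
--     if student_consecutive_k(column, 1, stone):
--       probability = 1
--     if student_consecutive_k(column, 2, stone):
--       probability = 2
--     if student_consecutive_k(column, 3, stone):
--       probability = 3
--     if student_consecutive_k(column, 4, stone):
--       probability = 4
--     if student_consecutive_k(column, 5, stone):
--       probability = 5
--   return probability
-- ===== SOURCE B (Python) =====
-- def column_probability(board, stone):
--     probability = 0
--     for j in range(len(board)):
--         cur = best = 0
--         for row in board:
--             if row[j] == stone:
--                 cur += 1
--                 if cur > best:
--                     best = cur
--             else:
--                 cur = 0
--         if best:
--             probability = min(best, 5)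
--     return probability
-- ===== Notes on version B (the rewrite author's own statement) =====
-- stated objective: faster
-- what changed: B drops the transpose and the five early-break re-scans per column: one direct pass per column index computes the maximum consecutive run with a running counter and takes min(best, 5) arithmetically.
import Mathlib
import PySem

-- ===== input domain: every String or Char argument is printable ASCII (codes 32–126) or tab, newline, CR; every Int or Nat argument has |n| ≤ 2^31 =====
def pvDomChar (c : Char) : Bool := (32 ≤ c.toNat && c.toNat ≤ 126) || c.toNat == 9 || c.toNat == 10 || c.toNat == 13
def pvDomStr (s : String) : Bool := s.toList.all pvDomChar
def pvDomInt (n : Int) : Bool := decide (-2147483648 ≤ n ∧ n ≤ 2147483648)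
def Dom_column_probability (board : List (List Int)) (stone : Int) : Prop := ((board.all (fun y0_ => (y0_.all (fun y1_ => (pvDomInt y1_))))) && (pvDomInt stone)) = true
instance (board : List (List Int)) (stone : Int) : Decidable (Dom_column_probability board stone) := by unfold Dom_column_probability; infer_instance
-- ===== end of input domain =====

-- B replaces A's transpose + five early-break membership scans per column by one direct
-- counting pass per column index (same asymptotics, measurably faster by avoiding the transposed copy and the repeated scans).

-- ===== PORT A =====
-- the for-loop with `break` becomes an early-returning recursion over the list, counter as parameter
def studentGo (l : List Int) (k stone counter : Int) : Bool :=
  match l with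
  | [] => false
  | i :: rest =>
      let c1 := if i = stone then counter + 1 else counter
      let c2 := if i ≠ stone then 0 else c1
      if c2 = k then true else studentGo rest k stone c2

def student_consecutive_k (input_list : List Int) (k stone : Int) : Bool :=
  studentGo input_list k stone 0

def get_column (board : List (List Int)) : List (List Int) :=
  (PySem.List.pyRange 0 board.length 1).foldl
    (fun columns column_idx =>
      columns ++ [board.foldl (fun single_column row =>
        single_column ++ [PySem.List.pyGetD row column_idx 0]) []]) []

def column_probability (board : List (List Int)) (stone : Int) : Int :=
  (get_column board).foldl
    (fun probability column =>
      let p1 := if student_consecutive_k column 1 stone then 1 else probability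
      let p2 := if student_consecutive_k column 2 stone then 2 else p1
      let p3 := if student_consecutive_k column 3 stone then 3 else p2
      let p4 := if student_consecutive_k column 4 stone then 4 else p3
      if student_consecutive_k column 5 stone then 5 else p4) 0

-- ===== PORT B =====
def colScanStep (stone : Int) (cb : Int × Int) (x : Int) : Int × Int :=
  if x = stone then
    let cur := cb.1 + 1
    (cur, if cur > cb.2 then cur else cb.2)
  else (0, cb.2)

def column_probability_alt (board : List (List Int)) (stone : Int) : Int :=
  (PySem.List.pyRange 0 board.length 1).foldl
    (fun probability j =>
      let best := (board.foldl (fun cb row => colScanStep stone cb (PySem.List.pyGetD row j 0)) (0, 0)).2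
      if best ≠ 0 then min best 5 else probability) 0

-- ===== PRECONDITION & SPEC =====
-- Pre_ excludes exactly the boards with a row shorter than len(board): there row[column_idx]
-- raises IndexError in A (and row[j] in B).
def Pre_column_probability (board : List (List Int)) (stone : Int) : Prop :=
  ∀ row ∈ board, board.length ≤ row.length
instance (board : List (List Int)) (stone : Int) : Decidable (Pre_column_probability board stone) := by unfold Pre_column_probability; infer_instance
def pvWitness_column_probability : List (List Int) × Int := ([[1, 0], [0, 1]], 1)

def Spec_column_probability (board : List (List Int)) (stone : Int) (out : Int) : Prop := out = column_probability_alt board stone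
instance (board : List (List Int)) (stone : Int) (out : Int) : Decidable (Spec_column_probability board stone out) := by unfold Spec_column_probability; infer_instance

-- ===== CLAIM (what is proved, stated in full; the proofs are below) =====
def Claim_equal_column_probability : Prop := ∀ (board : List (List Int)) (stone : Int), Dom_column_probability board stone → Pre_column_probability board stone → Spec_column_probability board stone (column_probability board stone)

-- ===== LEMMAS AND PROOFS =====

lemma colScanStep_eq (stone c b x : Int) :
    colScanStep stone (c, b) x
      = if x = stone then (c + 1, if c + 1 > b then c + 1 else b) else (0, b) := by
  simp [colScanStep]

lemma studentGo_cons (x : Int) (t : List Int) (k stone c : Int) :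
    studentGo (x :: t) k stone c =
      if x = stone then (if c + 1 = k then true else studentGo t k stone (c + 1))
      else (if (0 : Int) = k then true else studentGo t k stone 0) := by
  by_cases hx : x = stone <;> simp [studentGo, hx]

-- the running maximum of the column scan never decreases
lemma colScan_best_mono (stone : Int) : ∀ (l : List Int) (c b : Int),
    b ≤ (l.foldl (colScanStep stone) (c, b)).2 := by
  intro l
  induction l with
  | nil => intro c b; simp
  | cons x t ih =>
      intro c b
      simp only [List.foldl_cons, colScanStep_eq]
      by_cases hx : x = stone
      · rw [if_pos hx]
        exact le_trans (by split_ifs <;> omega) (ih (c + 1) (if c + 1 > b then c + 1 else b))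
      · rw [if_neg hx]
        exact ih 0 b

-- A's early-break scan decides whether the maximum consecutive run reaches k
lemma studentGo_eq (stone : Int) : ∀ (l : List Int) (c b k : Int),
    1 ≤ k → c < k → b < k →
    (studentGo l k stone c = decide (k ≤ (l.foldl (colScanStep stone) (c, b)).2)) := by
  intro l
  induction l with
  | nil =>
      intro c b k hk hc hb
      simp [studentGo, show ¬ (k ≤ b) by omega]
  | cons x t ih =>
      intro c b k hk hc hb
      rw [studentGo_cons, List.foldl_cons, colScanStep_eq]
      by_cases hx : x = stone
      · rw [if_pos hx, if_pos hx]
        by_cases hck : c + 1 = k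
        · rw [if_pos hck, show (if c + 1 > b then c + 1 else b) = c + 1 by omega]
          have hm := colScan_best_mono stone t (c + 1) (c + 1)
          simp [show k ≤ (t.foldl (colScanStep stone) (c + 1, c + 1)).2 by omega]
        · rw [if_neg hck,
              ih (c + 1) (if c + 1 > b then c + 1 else b) k hk (by omega) (by omega)]
      · rw [if_neg hx, if_neg hx, if_neg (show ¬ (0 : Int) = k by omega),
            ih 0 b k hk (by omega) hb]

-- building a list by `acc ++ [f x]` in a foldl is mapping
lemma foldl_append_map {α β : Type} (f : α → β) :
    ∀ (l : List α) (init : List β),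
      l.foldl (fun acc x => acc ++ [f x]) init = init ++ l.map f := by
  intro l
  induction l with
  | nil => intro init; simp
  | cons x t ih => intro init; simp [ih]

lemma get_column_eq (board : List (List Int)) :
    get_column board
      = (PySem.List.pyRange 0 board.length 1).map
          (fun idx => board.map (fun row => PySem.List.pyGetD row idx 0)) := by
  unfold get_column
  rw [foldl_append_map]
  simp only [List.nil_append]
  congr 1
  funext idx
  rw [foldl_append_map]
  simp

-- one column step of A (the five if-chains, zeta-reduced) equals one column step of B
lemma column_step_eq (stone : Int) (l : List Int) (p : Int) :
    (if student_consecutive_k l 5 stone then 5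
     else if student_consecutive_k l 4 stone then 4
     else if student_consecutive_k l 3 stone then 3
     else if student_consecutive_k l 2 stone then 2
     else if student_consecutive_k l 1 stone then 1 else p)
    = (if ((l.foldl (colScanStep stone) (0, 0)).2 ≠ 0)
        then min ((l.foldl (colScanStep stone) (0, 0)).2) 5 else p) := by
  have hmono := colScan_best_mono stone l 0 0
  simp only [student_consecutive_k,
    studentGo_eq stone l 0 0 1 (by omega) (by omega) (by omega),
    studentGo_eq stone l 0 0 2 (by omega) (by omega) (by omega),
    studentGo_eq stone l 0 0 3 (by omega) (by omega) (by omega),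
    studentGo_eq stone l 0 0 4 (by omega) (by omega) (by omega),
    studentGo_eq stone l 0 0 5 (by omega) (by omega) (by omega),
    decide_eq_true_eq]
  split_ifs <;> omega

-- ===== VERDICT (by name: the statement is the Claim_ definition above) =====
theorem column_probability_spec : Claim_equal_column_probability := by
  intro board stone _ _
  unfold Spec_column_probability column_probability column_probability_alt
  rw [get_column_eq, List.foldl_map]
  simp only [column_step_eq, List.foldl_map]
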